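-- pv_equiv track=rewrite | github.com/Marcozero2/payload_solver | game.py | player2_is_strongly_dominated_all_loop
-- ===== SOURCE A (Python) =====
-- def player2_is_strongly_dominated_all_loop(array, col):
--     """
--         Compares the col with each col in the array.
--         Returns True if the col is dominated by another strategy.
--         Returns False otherwise.
--     """
--     payload_compare = get_player2_payload_col(array, col)
--     for j in range(len(array[0])-1): #for each col in the first row
--         payload_p2 = get_player2_payload_col(array, j+1) #so go to the right most col of the given col. and the len is 3, so stop at col 2
--         if compare_payload(payload_compare, payload_p2) == True:
--             return True
--     if col >= 1: #want to check the columns before the col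
--         for j in range(0, col): #for each col in the first row
--             payload_p2 = get_player2_payload_col(array, j) #start at 0
--             if compare_payload(payload_compare, payload_p2) == True:
--                 return True
--     return False
--
-- def get_player2_payload_col(array, col):
--     """
--         Returns the payload for p2 for a col.
--     """
--     payload_array = []
--     for i in range(len(array)):
--         payload = array[i][col]
--         payload_p2 = payload[1]
--         payload_array.append(payload_p2)
--     return payload_array
--
-- def compare_payload(pay1, pay2):
--     """
--         Returns True if all of the values in the first array.
--         that correspond to the values in the second array is greater.
--         Returns False otherwise.
--     """
--     count = 0
--     for i in range(len(pay1)):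
--         if compare_to(pay1[i], pay2[i]) == -1:
--             count += 1
--     if count >= len(pay1):
--         return True
--     else:
--         return False
--
-- def compare_to(a, b):
--     """
--         Returns 1 if the first parameter is greater than the second parameter.
--         Returns -1 if the first parameter is less than the second parameter.
--         Returns 0 the parameters are equal.
--     """
--     if a > b:
--         return 1
--     elif a < b:
--         return -1
--     return 0
-- ===== SOURCE B (Python) =====
-- def player2_is_strongly_dominated_all_loop(array, col):
--     """Candidate-elimination: keep the columns that strictly beat `col`'s
--     player-2 payoff on every row; dominated iff any candidate survives."""
--     cols = len(array[0])
--     candidates = set(range(cols))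
--     for row in array:
--         base = row[col][1]
--         candidates = {j for j in candidates if row[j][1] > base}
--     return len(candidates) > 0
-- ===== Notes on version B (the rewrite author's own statement) =====
-- stated objective: alternative
-- what changed: Replaces A's column-by-column comparison (materialising each column's player-2 payoff list and comparing it entry-wise, in two separate index loops around col) with a single row-outer pass that maintains a shrinking set of candidate dominating columns; col self-eliminates, so no explicit skip is needed.
-- outside the precondition, e.g. on player2_is_strongly_dominated_all_loop([[(0, 5), (0, 1)]], -1): A returns False, B returns True; on player2_is_strongly_dominated_all_loop([[(0, 0), (0, 9), (0, 9)], [(0, 0), (0, 9)]], 0): A returns True, B raises IndexError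
import Mathlib
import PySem

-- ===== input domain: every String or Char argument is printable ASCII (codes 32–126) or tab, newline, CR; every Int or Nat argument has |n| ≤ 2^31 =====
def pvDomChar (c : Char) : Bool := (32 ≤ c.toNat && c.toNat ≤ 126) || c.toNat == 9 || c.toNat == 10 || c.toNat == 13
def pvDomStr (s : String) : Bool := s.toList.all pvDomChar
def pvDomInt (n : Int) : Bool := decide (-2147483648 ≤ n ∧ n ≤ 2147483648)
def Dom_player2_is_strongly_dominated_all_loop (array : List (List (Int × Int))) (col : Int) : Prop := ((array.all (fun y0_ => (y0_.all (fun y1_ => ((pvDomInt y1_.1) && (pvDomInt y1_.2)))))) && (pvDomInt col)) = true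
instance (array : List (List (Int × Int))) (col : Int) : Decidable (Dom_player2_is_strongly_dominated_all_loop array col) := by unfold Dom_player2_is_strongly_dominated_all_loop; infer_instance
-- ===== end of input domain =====

-- B replaces A's two column-index loops (each materialising a payoff column and comparing it
-- entry-wise) with one row-outer pass over a shrinking set of candidate dominating columns;
-- same results on Pre_ (non-empty array, 0 <= col < number of columns, no short ragged rows).


-- ===== PORT A =====
-- compare_to(a, b)
def pvCompareTo (a b : Int) : Int := if a > b then 1 else if a < b then -1 else 0

-- get_player2_payload_col(array, col): loop over the rows appending row[col][1]
def pvGetP2Col (array : List (List (Int × Int))) (col : Int) : List Int :=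
  array.foldl (fun acc row => acc ++ [((PySem.List.pyGet? row col).getD (0, 0)).2]) []

-- compare_payload(pay1, pay2): count the indices where pay1[i] < pay2[i], then count >= len(pay1)
def pvComparePayload (pay1 pay2 : List Int) : Bool :=
  let count := (PySem.List.pyRange 0 (pay1.length : Int) 1).foldl
      (fun c i => if pvCompareTo (PySem.List.pyGetD pay1 i 0) (PySem.List.pyGetD pay2 i 0) == -1 then c + 1 else c)
      (0 : Int)
  decide (count ≥ (pay1.length : Int))

def player2_is_strongly_dominated_all_loop (array : List (List (Int × Int))) (col : Int) : Bool :=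
  let payload_compare := pvGetP2Col array col
  let cols := ((PySem.List.pyGet? array 0).getD []).length
  if (PySem.List.pyRange 0 ((cols : Int) - 1) 1).any
      (fun j => pvComparePayload payload_compare (pvGetP2Col array (j + 1))) then
    true
  else if col ≥ 1 then
    (PySem.List.pyRange 0 col 1).any (fun j => pvComparePayload payload_compare (pvGetP2Col array j))
  else false

-- ===== PORT B =====
def player2_is_strongly_dominated_all_loop_alt (array : List (List (Int × Int))) (col : Int) : Bool :=
  let cols := ((PySem.List.pyGet? array 0).getD []).length
  let final := array.foldl
    (fun cand row =>
      let base := ((PySem.List.pyGet? row col).getD (0, 0)).2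
      PySem.Set.ofList (cand.filter (fun j => decide (((PySem.List.pyGet? row j).getD (0, 0)).2 > base))))
    (PySem.Set.ofList (PySem.List.pyRange 0 (cols : Int) 1))
  decide (0 < final.length)

-- ===== PRECONDITION & SPEC =====
-- Pre_ excludes negative (and out-of-range) col — Python wraparound outside the natural column
-- domain, where A skips column 0 — and ragged arrays whose later rows are shorter than the first,
-- on which A (and B) usually raise IndexError but A can early-return before touching a missing entry.
def Pre_player2_is_strongly_dominated_all_loop (array : List (List (Int × Int))) (col : Int) : Prop :=
  array ≠ [] ∧ 0 ≤ col ∧ col < (array.headI.length : Int) ∧ ∀ row ∈ array, array.headI.length ≤ row.length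
instance (array : List (List (Int × Int))) (col : Int) : Decidable (Pre_player2_is_strongly_dominated_all_loop array col) := by unfold Pre_player2_is_strongly_dominated_all_loop; infer_instance

def pvWitness_player2_is_strongly_dominated_all_loop : (List (List (Int × Int))) × Int := ([[(0, 0), (0, 1)]], 0)

def Spec_player2_is_strongly_dominated_all_loop (array : List (List (Int × Int))) (col : Int) (out : Bool) : Prop := out = player2_is_strongly_dominated_all_loop_alt array col
instance (array : List (List (Int × Int))) (col : Int) (out : Bool) : Decidable (Spec_player2_is_strongly_dominated_all_loop array col out) := by unfold Spec_player2_is_strongly_dominated_all_loop; infer_instance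

-- ===== CLAIM (what is proved, stated in full; the proofs are below) =====
def Claim_equal_player2_is_strongly_dominated_all_loop : Prop := ∀ (array : List (List (Int × Int))) (col : Int), Dom_player2_is_strongly_dominated_all_loop array col → Pre_player2_is_strongly_dominated_all_loop array col → Spec_player2_is_strongly_dominated_all_loop array col (player2_is_strongly_dominated_all_loop array col)

-- ===== LEMMAS AND PROOFS =====

-- "column j strictly dominates column col on every row" as both programs test it
def pvColBeats (array : List (List (Int × Int))) (col j : Int) : Bool :=
  array.all (fun row => decide (((PySem.List.pyGet? row col).getD (0, 0)).2 < ((PySem.List.pyGet? row j).getD (0, 0)).2))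

theorem pvCompareTo_eq (a b : Int) : (pvCompareTo a b == -1) = decide (a < b) := by
  unfold pvCompareTo; split_ifs with h1 h2 <;> simp <;> omega

theorem pvGetP2Col_eq_map (array : List (List (Int × Int))) (j : Int) :
    pvGetP2Col array j = array.map (fun row => ((PySem.List.pyGet? row j).getD (0, 0)).2) := by
  unfold pvGetP2Col
  rw [PySem.List.foldl_append_singleton_eq_map]
  simp

theorem pvComparePayload_map (f g : List (Int × Int) → Int) (array : List (List (Int × Int))) :
    pvComparePayload (array.map f) (array.map g) = array.all (fun row => decide (f row < g row)) := by
  rw [Bool.eq_iff_iff]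
  unfold pvComparePayload
  rw [PySem.List.foldl_if_add_one
        (p := fun i => pvCompareTo (PySem.List.pyGetD (array.map f) i 0) (PySem.List.pyGetD (array.map g) i 0) == -1)]
  simp only [List.length_map, decide_eq_true_eq, List.all_eq_true, zero_add]
  set n := array.length with hn
  have hlen : (PySem.List.pyRange 0 (n : Int) 1).length = n := by
    rw [PySem.List.length_pyRange_one]; omega
  have hle : (PySem.List.pyRange 0 (n : Int) 1).countP
      (fun i => pvCompareTo (PySem.List.pyGetD (array.map f) i 0) (PySem.List.pyGetD (array.map g) i 0) == -1) ≤ n := by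
    have h := List.countP_le_length (p := fun i => pvCompareTo (PySem.List.pyGetD (array.map f) i 0) (PySem.List.pyGetD (array.map g) i 0) == -1) (l := PySem.List.pyRange 0 (n : Int) 1)
    omega
  constructor
  · intro h row hrow
    have hall : ∀ i ∈ PySem.List.pyRange 0 (n : Int) 1,
        (pvCompareTo (PySem.List.pyGetD (array.map f) i 0) (PySem.List.pyGetD (array.map g) i 0) == -1) = true := by
      rw [← List.countP_eq_length, hlen]; omega
    obtain ⟨k, hk, hkeq⟩ := List.mem_iff_getElem.mp hrow
    have hmem : ((k : Int)) ∈ PySem.List.pyRange 0 (n : Int) 1 := by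
      rw [PySem.List.mem_pyRange_one]; omega
    have := hall _ hmem
    rw [pvCompareTo_eq] at this
    have hgf : PySem.List.pyGetD (array.map f) ((k : Int)) 0 = f row := by
      rw [PySem.List.pyGetD_natCast]
      rw [List.getD_eq_getElem _ _ (by simp; omega)]
      simp [hkeq]
    have hgg : PySem.List.pyGetD (array.map g) ((k : Int)) 0 = g row := by
      rw [PySem.List.pyGetD_natCast]
      rw [List.getD_eq_getElem _ _ (by simp; omega)]
      simp [hkeq]
    rw [hgf, hgg] at this
    exact of_decide_eq_true this
  · intro h
    have : ∀ i ∈ PySem.List.pyRange 0 (n : Int) 1,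
        (pvCompareTo (PySem.List.pyGetD (array.map f) i 0) (PySem.List.pyGetD (array.map g) i 0) == -1) = true := by
      intro i hi
      rw [PySem.List.mem_pyRange_one] at hi
      obtain ⟨hi0, hin⟩ := hi
      rw [pvCompareTo_eq]
      have hk : i.toNat < n := by omega
      have hgf : PySem.List.pyGetD (array.map f) i 0 = f array[i.toNat] := by
        rw [PySem.List.pyGetD_eq_getElem _ 0 hi0 (by simp; omega)]
        simp
      have hgg : PySem.List.pyGetD (array.map g) i 0 = g array[i.toNat] := by
        rw [PySem.List.pyGetD_eq_getElem _ 0 hi0 (by simp; omega)]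
        simp
      rw [hgf, hgg]
      exact decide_eq_true (h _ (List.getElem_mem hk))
    rw [← List.countP_eq_length] at this
    omega

-- A's entry-wise column comparison IS the per-row domination test
theorem pvComparePayload_cols (array : List (List (Int × Int))) (col j : Int) :
    pvComparePayload (pvGetP2Col array col) (pvGetP2Col array j) = pvColBeats array col j := by
  rw [pvGetP2Col_eq_map, pvGetP2Col_eq_map]
  exact pvComparePayload_map _ _ _

theorem foldl_filter_set (p : List (Int × Int) → Int → Bool) :
    ∀ (l : List (List (Int × Int))) (init : List Int), init.Nodup →
      l.foldl (fun cand row => PySem.Set.ofList (cand.filter (p row))) init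
        = init.filter (fun j => l.all (fun row => p row j)) := by
  intro l
  induction l with
  | nil => intro init _; simp
  | cons r t ih =>
      intro init hn
      simp only [List.foldl_cons]
      rw [PySem.Set.ofList_eq_self_of_nodup _ (hn.filter _), ih _ (hn.filter _), List.filter_filter]
      simp only [List.all_cons, Bool.and_comm]

-- col never strictly dominates itself (the array is non-empty)
theorem pvColBeats_self (array : List (List (Int × Int))) (col : Int) (h : array ≠ []) :
    pvColBeats array col col = false := by
  rcases array with _ | ⟨r, t⟩
  · exact absurd rfl h
  · simp [pvColBeats]

-- ===== VERDICT (by name: the statement is the Claim_ definition above) =====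
theorem player2_is_strongly_dominated_all_loop_spec : Claim_equal_player2_is_strongly_dominated_all_loop := by
  intro array col _ hpre
  obtain ⟨hne, hc0, hclt, hrows⟩ := hpre
  unfold Spec_player2_is_strongly_dominated_all_loop
  rcases array with _ | ⟨r, t⟩
  · exact absurd rfl hne
  simp only [List.headI_cons] at hclt
  rw [Bool.eq_iff_iff]
  have halt : player2_is_strongly_dominated_all_loop_alt (r :: t) col = true ↔
      ∃ j : Int, (0 ≤ j ∧ j < (r.length : Int)) ∧ pvColBeats (r :: t) col j = true := by
    simp only [player2_is_strongly_dominated_all_loop_alt, PySem.List.pyGet?_zero_cons,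
      Option.getD_some]
    rw [PySem.Set.ofList_eq_self_of_nodup _ (PySem.List.nodup_pyRange_one _ _)]
    rw [foldl_filter_set
        (p := fun row j => decide (((PySem.List.pyGet? row j).getD (0, 0)).2 > ((PySem.List.pyGet? row col).getD (0, 0)).2))
        _ _ (PySem.List.nodup_pyRange_one _ _)]
    simp only [decide_eq_true_eq, List.length_pos_iff, Ne, List.eq_nil_iff_forall_not_mem,
      List.mem_filter, PySem.List.mem_pyRange_one, pvColBeats, gt_iff_lt, not_forall]
    push Not
    simp only [and_assoc]
  have e1 : ((PySem.List.pyRange 0 ((r.length : Int) - 1) 1).any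
      (fun j => pvComparePayload (pvGetP2Col (r :: t) col) (pvGetP2Col (r :: t) (j + 1)))) = true ↔
      ∃ j : Int, (0 ≤ j ∧ j < (r.length : Int) - 1) ∧ pvColBeats (r :: t) col (j + 1) = true := by
    simp only [List.any_eq_true, pvComparePayload_cols, PySem.List.mem_pyRange_one, and_assoc]
  have e2 : ((PySem.List.pyRange 0 col 1).any
      (fun j => pvComparePayload (pvGetP2Col (r :: t) col) (pvGetP2Col (r :: t) j))) = true ↔
      ∃ j : Int, (0 ≤ j ∧ j < col) ∧ pvColBeats (r :: t) col j = true := by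
    simp only [List.any_eq_true, pvComparePayload_cols, PySem.List.mem_pyRange_one, and_assoc]
  have hA : player2_is_strongly_dominated_all_loop (r :: t) col = true ↔
      ((∃ j : Int, (0 ≤ j ∧ j < (r.length : Int) - 1) ∧ pvColBeats (r :: t) col (j + 1) = true) ∨
       (1 ≤ col ∧ ∃ j : Int, (0 ≤ j ∧ j < col) ∧ pvColBeats (r :: t) col j = true)) := by
    simp only [player2_is_strongly_dominated_all_loop, PySem.List.pyGet?_zero_cons,
      Option.getD_some]
    split_ifs with h1 h2
    · simp only [true_iff]
      exact Or.inl (e1.mp h1)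
    · rw [e2]
      constructor
      · intro h; exact Or.inr ⟨h2, h⟩
      · rintro (h | ⟨_, h⟩)
        · exact absurd (e1.mpr h) h1
        · exact h
    · simp only [false_iff]
      rintro (h | ⟨hc, _⟩)
      · exact h1 (e1.mpr h)
      · omega
  rw [hA, halt]
  constructor
  · rintro (⟨j, ⟨hj0, hjlt⟩, hd⟩ | ⟨hc1, j, ⟨hj0, hjlt⟩, hd⟩)
    · exact ⟨j + 1, ⟨by omega, by omega⟩, hd⟩
    · exact ⟨j, ⟨hj0, by omega⟩, hd⟩
  · rintro ⟨k, ⟨hk0, hklt⟩, hd⟩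
    have hkc : k ≠ col := by
      rintro rfl
      rw [pvColBeats_self _ _ (by simp)] at hd
      exact absurd hd (by simp)
    by_cases hk1 : 1 ≤ k
    · refine Or.inl ⟨k - 1, ⟨by omega, by omega⟩, ?_⟩
      rw [show k - 1 + 1 = k from by omega]
      exact hd
    · have hk0' : k = 0 := by omega
      subst hk0'
      exact Or.inr ⟨by omega, 0, ⟨le_refl 0, by omega⟩, hd⟩
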